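-- pv_equiv track=rewrite | github.com/FinchMF/sentiNet | NN/util.py | build_word_counters
-- ===== SOURCE A (Python) =====
-- from collections import Counter
-- from typing import ( List, Dict, Any, Type, TypeVar, Union )
--
-- def build_word_counters(labels: List[str], text: List[str]) -> Union[Dict[str, int],
--                                                                      Dict[str, int],
--                                                                      Dict[str, int]]:
--
--     severe_counts = Counter()
--     nonSevere_counts = Counter()
--     total_counts = Counter()
--
--     for i in range(len(text)):
--
--         if labels[i] == 'severe':
--
--             for word in text[i].split(" "):
--                 severe_counts[word] += 1
--                 total_counts[word] += 1
--
--         else: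
--
--             for word in text[i].split(" "):
--                 nonSevere_counts[word] += 1
--                 total_counts[word] += 1
--
--     return ( severe_counts, nonSevere_counts, total_counts )
-- ===== SOURCE B (Python) =====
-- from collections import Counter
--
-- def build_word_counters(labels, text):
--     # Three independent one-shot Counter constructions over generator streams
--     severe_counts = Counter(w for lab, t in zip(labels, text)
--                               if lab == 'severe' for w in t.split(" "))
--     nonSevere_counts = Counter(w for lab, t in zip(labels, text)
--                                  if lab != 'severe' for w in t.split(" "))
--     total_counts = Counter(w for t in text for w in t.split(" "))
--     return (severe_counts, nonSevere_counts, total_counts)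
-- ===== Notes on version B (the rewrite author's own statement) =====
-- stated objective: idiomatic
-- what changed: A's single indexed loop that increments three counters in place is replaced by three independent one-shot Counter(generator) constructions over zip-filtered word streams, with no mutable counter state in the function body.
import Mathlib
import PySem

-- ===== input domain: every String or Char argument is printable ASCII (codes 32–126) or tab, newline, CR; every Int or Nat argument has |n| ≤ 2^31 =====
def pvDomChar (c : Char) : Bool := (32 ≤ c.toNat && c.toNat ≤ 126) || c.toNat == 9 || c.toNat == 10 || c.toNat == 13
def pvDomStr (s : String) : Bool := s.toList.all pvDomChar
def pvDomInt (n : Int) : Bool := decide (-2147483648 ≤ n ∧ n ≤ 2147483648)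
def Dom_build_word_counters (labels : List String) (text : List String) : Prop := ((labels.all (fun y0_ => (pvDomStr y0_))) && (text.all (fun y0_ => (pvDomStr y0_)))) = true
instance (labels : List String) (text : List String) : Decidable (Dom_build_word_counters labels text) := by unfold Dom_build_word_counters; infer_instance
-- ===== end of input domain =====

-- B replaces A's single indexed loop mutating three counters by three independent
-- one-shot Counter constructions over zip-filtered word streams (same cost, idiomatic).

-- words(s) = s.split(" "): the separator " " is non-empty, so Python's split always
-- returns a list; PySem.Str.split? is some there, the [] default is never reached.
def pvWords (s : String) : List String := (PySem.Str.split? s " ").getD []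

-- ===== PORT A =====
-- labels[i] raises IndexError when i ≥ len(labels); Pre_ excludes exactly those inputs,
-- so the getD "" default below is never reached on admitted inputs.
def build_word_counters (labels : List String) (text : List String) : (List (String × Int)) × (List (String × Int)) × (List (String × Int)) :=
  let st :=
    (PySem.List.pyRange 0 text.length 1).foldl
      (fun (st : PySem.Dict String Int × PySem.Dict String Int × PySem.Dict String Int) i =>
        if PySem.List.pyGetD labels i "" == "severe" then
          (pvWords (PySem.List.pyGetD text i "")).foldl
            (fun st w => (st.1.modify w 0 (· + 1), st.2.1, st.2.2.modify w 0 (· + 1))) st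
        else
          (pvWords (PySem.List.pyGetD text i "")).foldl
            (fun st w => (st.1, st.2.1.modify w 0 (· + 1), st.2.2.modify w 0 (· + 1))) st)
      (PySem.Dict.empty, PySem.Dict.empty, PySem.Dict.empty)
  (st.1.items, st.2.1.items, st.2.2.items)

-- ===== PORT B =====
def build_word_counters_alt (labels : List String) (text : List String) : (List (String × Int)) × (List (String × Int)) × (List (String × Int)) :=
  let sev : PySem.Dict String Int :=
    PySem.Dict.counter (((labels.zip text).filter (fun p => p.1 == "severe")).flatMap
      (fun p => pvWords p.2))
  let non : PySem.Dict String Int :=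
    PySem.Dict.counter (((labels.zip text).filter (fun p => !(p.1 == "severe"))).flatMap
      (fun p => pvWords p.2))
  let tot : PySem.Dict String Int :=
    PySem.Dict.counter (text.flatMap pvWords)
  (sev.items, non.items, tot.items)

-- ===== PRECONDITION & SPEC =====
-- Pre_ excludes exactly the inputs where A raises IndexError (labels shorter than text).
def Pre_build_word_counters (labels : List String) (text : List String) : Prop :=
  text.length ≤ labels.length
instance (labels : List String) (text : List String) : Decidable (Pre_build_word_counters labels text) := by unfold Pre_build_word_counters; infer_instance
def pvWitness_build_word_counters : List String × List String :=
  (["severe", "x"], ["a b a", "b"])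

def Spec_build_word_counters (labels : List String) (text : List String) (out : (List (String × Int)) × (List (String × Int)) × (List (String × Int))) : Prop := out = build_word_counters_alt labels text
instance (labels : List String) (text : List String) (out : (List (String × Int)) × (List (String × Int)) × (List (String × Int))) : Decidable (Spec_build_word_counters labels text out) := by unfold Spec_build_word_counters; infer_instance

-- ===== CLAIM (what is proved, stated in full; the proofs are below) =====
def Claim_equal_build_word_counters : Prop := ∀ (labels : List String) (text : List String), Dom_build_word_counters labels text → Pre_build_word_counters labels text → Spec_build_word_counters labels text (build_word_counters labels text)

-- ===== LEMMAS AND PROOFS =====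

-- count a word list into a dict (one Counter increment per word)
def pvCountInto (d : PySem.Dict String Int) (ws : List String) : PySem.Dict String Int :=
  ws.foldl (fun d w => d.modify w 0 (· + 1)) d

lemma pvCountInto_append (d : PySem.Dict String Int) (xs ys : List String) :
    pvCountInto d (xs ++ ys) = pvCountInto (pvCountInto d xs) ys := by
  simp [pvCountInto, List.foldl_append]

-- A's inner loop over the words of one text, componentwise (severe branch)
lemma pvInner_sev (ws : List String) :
    ∀ s n t : PySem.Dict String Int,
      ws.foldl (fun st w => (st.1.modify w 0 (· + 1), st.2.1, st.2.2.modify w 0 (· + 1))) (s, n, t)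
        = (pvCountInto s ws, n, pvCountInto t ws) := by
  induction ws with
  | nil => intro s n t; simp [pvCountInto]
  | cons w ws ih => intro s n t; simpa [pvCountInto, List.foldl_cons] using ih _ _ _

lemma pvInner_non (ws : List String) :
    ∀ s n t : PySem.Dict String Int,
      ws.foldl (fun st w => (st.1, st.2.1.modify w 0 (· + 1), st.2.2.modify w 0 (· + 1))) (s, n, t)
        = (s, pvCountInto n ws, pvCountInto t ws) := by
  induction ws with
  | nil => intro s n t; simp [pvCountInto]
  | cons w ws ih => intro s n t; simpa [pvCountInto, List.foldl_cons] using ih _ _ _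

-- A's outer loop, rephrased over the zipped (label, text) list, computes the three stream counts
lemma pvZipFold (zl : List (String × String)) :
    ∀ s n t : PySem.Dict String Int,
      zl.foldl
        (fun (st : PySem.Dict String Int × PySem.Dict String Int × PySem.Dict String Int) p =>
          if p.1 == "severe" then
            (pvWords p.2).foldl
              (fun st w => (st.1.modify w 0 (· + 1), st.2.1, st.2.2.modify w 0 (· + 1))) st
          else
            (pvWords p.2).foldl
              (fun st w => (st.1, st.2.1.modify w 0 (· + 1), st.2.2.modify w 0 (· + 1))) st)
        (s, n, t)
      = (pvCountInto s ((zl.filter (fun p => p.1 == "severe")).flatMap (fun p => pvWords p.2)),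
         pvCountInto n ((zl.filter (fun p => !(p.1 == "severe"))).flatMap (fun p => pvWords p.2)),
         pvCountInto t (zl.flatMap (fun p => pvWords p.2))) := by
  induction zl with
  | nil => intro s n t; simp [pvCountInto]
  | cons p zl ih =>
    intro s n t
    by_cases hp : p.1 == "severe"
    · simp only [List.foldl_cons, List.filter_cons, List.flatMap_cons, hp, if_pos,
        Bool.not_true, Bool.false_eq_true, reduceIte, pvCountInto_append]
      rw [pvInner_sev, ih]
    · simp only [List.foldl_cons, List.filter_cons, List.flatMap_cons, hp,
        Bool.not_false, Bool.false_eq_true, reduceIte, pvCountInto_append]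
      rw [pvInner_non, ih]

-- A's range-indexed outer loop equals the fold over the zipped prefix
lemma pvRangeFold (labels text : List String)
    (body : (PySem.Dict String Int × PySem.Dict String Int × PySem.Dict String Int) → (String × String) → (PySem.Dict String Int × PySem.Dict String Int × PySem.Dict String Int)) :
    ∀ (m : Nat), m ≤ labels.length → m ≤ text.length → ∀ init,
      (PySem.List.pyRange 0 (m : Int) 1).foldl
        (fun st i => body st (PySem.List.pyGetD labels i "", PySem.List.pyGetD text i "")) init
      = ((labels.zip text).take m).foldl body init := by
  intro m
  induction m with
  | zero => intro _ _ init; simp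
  | succ k ih =>
    intro h1 h2 init
    have hk1 : k < labels.length := by omega
    have hk2 : k < text.length := by omega
    have hz : k < (labels.zip text).length := by
      simp only [List.length_zip]; omega
    have hsplit : PySem.List.pyRange 0 ((k : Int) + 1) 1
        = PySem.List.pyRange 0 (k : Int) 1 ++ [(k : Int)] :=
      PySem.List.pyRange_one_succ_right (by positivity)
    have htake : (labels.zip text).take (k + 1)
        = (labels.zip text).take k ++ [(labels.zip text)[k]] := by
      rw [List.take_add_one]; simp [List.getElem?_eq_getElem hz]
    have hcast : ((k + 1 : Nat) : Int) = (k : Int) + 1 := by push_cast; ring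
    rw [hcast, hsplit, htake, List.foldl_append, List.foldl_append,
      ih (by omega) (by omega)]
    simp [PySem.List.pyGetD_natCast, List.getD, hk1, hk2, List.getElem_zip]

-- B's filtered streams of the total equal the plain text stream when labels cover text
lemma pvTotStream (labels text : List String) (h : text.length ≤ labels.length) :
    (labels.zip text).flatMap (fun p => pvWords p.2) = text.flatMap pvWords := by
  have hmap : (labels.zip text).map Prod.snd = text := List.map_snd_zip h
  calc (labels.zip text).flatMap (fun p => pvWords p.2)
      = ((labels.zip text).map Prod.snd).flatMap pvWords := by
        rw [List.flatMap_map]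
    _ = text.flatMap pvWords := by rw [hmap]

-- ===== VERDICT (by name: the statement is the Claim_ definition above) =====
theorem build_word_counters_spec : Claim_equal_build_word_counters := by
  intro labels text _ hpre
  unfold Pre_build_word_counters at hpre
  unfold Spec_build_word_counters build_word_counters build_word_counters_alt
  have hlen : (labels.zip text).length = text.length := by
    simp only [List.length_zip]; omega
  have hrange := pvRangeFold labels text
    (fun st p =>
      if p.1 == "severe" then
        (pvWords p.2).foldl
          (fun st w => (st.1.modify w 0 (· + 1), st.2.1, st.2.2.modify w 0 (· + 1))) st
      else
        (pvWords p.2).foldl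
          (fun st w => (st.1, st.2.1.modify w 0 (· + 1), st.2.2.modify w 0 (· + 1))) st)
    text.length hpre (le_refl _)
    (PySem.Dict.empty, PySem.Dict.empty, PySem.Dict.empty)
  have htake : (labels.zip text).take text.length = labels.zip text := by
    rw [← hlen]; exact List.take_length
  rw [htake] at hrange
  rw [hrange, pvZipFold]
  rw [PySem.Dict.counter_eq_foldl, PySem.Dict.counter_eq_foldl, PySem.Dict.counter_eq_foldl]
  rw [pvTotStream labels text hpre]
  rfl
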